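-- pv_equiv track=rewrite | github.com/lolmomarchal/Alignment-CSE185-SP24- | src/RefIndexing.py | build_fm_index
-- ===== SOURCE A (Python) =====
-- from collections import Counter, defaultdict
--
-- def build_fm_index(bwt):
--     # C array
--     counts = Counter(bwt)
--     total_counts = dict()
--     sum_counts = 0
--     for char in sorted(counts.keys()):
--         total_counts[char] = sum_counts
--         sum_counts += counts[char]
--
--     # O table
--     occ_counts_before = defaultdict(lambda: [0] * (len(bwt) + 1))
--     for i in range(len(bwt)):
--         char = bwt[i]
--         for c in occ_counts_before:
--             occ_counts_before[c][i + 1] = occ_counts_before[c][i]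
--         occ_counts_before[char][i + 1] += 1
--
--     return total_counts, occ_counts_before
-- ===== SOURCE B (Python) =====
-- from collections import defaultdict
--
-- def build_fm_index(bwt):
--     # C array: for each distinct char, number of characters in bwt strictly smaller.
--     total_counts = {c: sum(1 for x in bwt if x < c) for c in sorted(set(bwt))}
--
--     # O table: one forward pass per distinct char (first-occurrence order),
--     # writing the whole prefix-count column at once.
--     n = len(bwt)
--     occ = defaultdict(lambda: [0] * (n + 1))
--     for c in dict.fromkeys(bwt):
--         col = [0]
--         run = 0
--         for ch in bwt:
--             if ch == c:
--                 run += 1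
--             col.append(run)
--         occ[c] = col
--     return total_counts, occ
-- ===== Notes on version B (the rewrite author's own statement) =====
-- stated objective: simpler
-- what changed: The C array is computed as a closed form per distinct character (count of strictly smaller characters) instead of a running-sum fold over sorted keys, and the occurrence table is built column-by-column (one forward pass per distinct character writing its whole prefix-count list) instead of A's position-by-position loop that copies every key's previous entry in place.
import Mathlib
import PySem

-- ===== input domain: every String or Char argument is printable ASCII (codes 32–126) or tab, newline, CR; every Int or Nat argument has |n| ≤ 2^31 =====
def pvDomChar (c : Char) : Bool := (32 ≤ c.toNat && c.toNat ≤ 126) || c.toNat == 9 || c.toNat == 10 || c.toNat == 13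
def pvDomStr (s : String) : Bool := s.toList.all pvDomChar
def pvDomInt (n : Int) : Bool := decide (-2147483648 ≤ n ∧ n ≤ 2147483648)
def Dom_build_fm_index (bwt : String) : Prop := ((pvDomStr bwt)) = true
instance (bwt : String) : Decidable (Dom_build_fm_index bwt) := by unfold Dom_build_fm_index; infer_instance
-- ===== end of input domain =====

-- B builds the FM-index structures by closed forms per distinct character (C entry = number of
-- strictly smaller characters; O column = one forward prefix-count pass) instead of A's running-sum
-- fold and position-by-position in-place table updates.  Objective: simpler.

-- ===== PORT A =====
-- Python iteration over a str yields 1-character strings; both ports work on that list.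
def build_fm_index (bwt : String) : (List (String × Int)) × (List (String × List Int)) :=
  let s : List String := bwt.toList.map (fun c => String.ofList [c])
  let counts : PySem.Dict String Int := PySem.Dict.counter s
  -- C array: running-sum fold over the sorted keys
  let tc : PySem.Dict String Int × Int :=
    (PySem.List.sorted counts.keys (fun x => x) false).foldl
      (fun p ch => (p.1.insert ch p.2, p.2 + counts.getD ch 0)) (PySem.Dict.empty, 0)
  let n : Nat := s.length
  -- O table: for each position i, copy every key's entry i to i+1, then bump bwt[i]'s entry i+1
  -- (defaultdict access = getD with the factory's list, inserting on first touch)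
  let occ : PySem.Dict String (List Int) :=
    (PySem.List.pyRange 0 (n : Int)).foldl
      (fun d i =>
        let ch := PySem.List.pyGetD s i ""
        let d1 := d.keys.foldl
          (fun (d' : PySem.Dict String (List Int)) c =>
            let v := d'.getD c (List.replicate (n + 1) (0 : Int))
            d'.insert c (PySem.List.pySetD v (i + 1) (PySem.List.pyGetD v i 0))) d
        let w := d1.getD ch (List.replicate (n + 1) (0 : Int))
        d1.insert ch (PySem.List.pySetD w (i + 1) (PySem.List.pyGetD w (i + 1) 0 + 1)))
      PySem.Dict.empty
  (tc.1.items, occ.items)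

-- ===== PORT B =====
def build_fm_index_alt (bwt : String) : (List (String × Int)) × (List (String × List Int)) :=
  let s : List String := bwt.toList.map (fun c => String.ofList [c])
  -- C array: {c: sum(1 for x in bwt if x < c) for c in sorted(set(bwt))}
  let tc : List (String × Int) :=
    (PySem.List.sorted (PySem.Set.ofList s) (fun x => x) false).map
      (fun c => (c, (s.countP (fun x => decide (x < c)) : Int)))
  -- O table: one forward pass per distinct char (first-occurrence order), appending the running count
  let occ : List (String × List Int) :=
    (PySem.List.dedup s).map
      (fun c =>
        (c, (s.foldl (fun (acc : List Int × Int) ch =>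
              let r := if ch == c then acc.2 + 1 else acc.2
              (acc.1 ++ [r], r)) ([0], 0)).1))
  (tc, occ)

-- ===== PRECONDITION & SPEC =====
def Spec_build_fm_index (bwt : String) (out : (List (String × Int)) × (List (String × List Int))) : Prop := out = build_fm_index_alt bwt
instance (bwt : String) (out : (List (String × Int)) × (List (String × List Int))) : Decidable (Spec_build_fm_index bwt out) := by unfold Spec_build_fm_index; infer_instance

-- ===== CLAIM (what is proved, stated in full; the proofs are below) =====
def Claim_equal_build_fm_index : Prop := ∀ (bwt : String), Dom_build_fm_index bwt → Spec_build_fm_index bwt (build_fm_index bwt)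

-- ===== LEMMAS AND PROOFS =====

lemma pvCount_append_x (c x : String) (t : List String) :
    ((t ++ [x]).count c : Int) = if (x == c) = true then (t.count c : Int) + 1 else (t.count c : Int) := by
  rw [List.count_append]
  by_cases h : (x == c) = true
  · rw [if_pos h]
    have : List.count c [x] = 1 := by simp [List.count_cons, h]
    rw [this]; push_cast; ring
  · rw [if_neg h]
    have : List.count c [x] = 0 := by simp [List.count_cons, h]
    rw [this]; push_cast; ring

lemma pvB_col (c : String) (t : List String) :
    t.foldl (fun (acc : List Int × Int) ch =>
        let r := if ch == c then acc.2 + 1 else acc.2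
        (acc.1 ++ [r], r)) ([0], 0)
      = ((List.range (t.length + 1)).map (fun j => ((t.take j).count c : Int)), (t.count c : Int)) := by
  induction t using List.reverseRecOn with
  | nil => simp
  | append_singleton t x ih =>
    rw [List.foldl_append, ih]
    simp only [List.foldl_cons, List.foldl_nil]
    rw [Prod.mk.injEq]
    refine ⟨?_, (pvCount_append_x c x t).symm⟩
    rw [List.length_append, List.length_singleton,
        List.range_succ (n := t.length + 1), List.map_append]
    congr 1
    · apply List.map_congr_left
      intro j hj
      rw [List.take_append_of_le_length (by simpa using Nat.lt_succ_iff.mp (List.mem_range.mp hj))]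
    · rw [List.map_singleton, List.take_of_length_le (by simp), pvCount_append_x c x t]

def pvG (s : List String) (m : Int) : List String → List (String × Int)
  | [] => []
  | c :: l => (c, m) :: pvG s (m + (s.count c : Int)) l

lemma pvA_tc_fold (s : List String) (l : List String) (d : PySem.Dict String Int) (m : Int)
    (hf : ∀ c ∈ l, d.contains c = false) (hnd : l.Nodup) :
    ((l.foldl (fun p ch => (p.1.insert ch p.2, p.2 + (PySem.Dict.counter s).getD ch 0)) (d, m)).1).items
      = d.items ++ pvG s m l := by
  induction l generalizing d m with
  | nil => simp [pvG]
  | cons c l ih =>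
    rw [List.foldl_cons]
    have hc : d.contains c = false := hf c (List.mem_cons_self ..)
    have hfresh : ∀ c' ∈ l, (d.insert c m).contains c' = false := by
      intro c' hc'
      rw [PySem.Dict.contains_insert]
      have hne : c' ≠ c := by
        intro he; exact (List.nodup_cons.mp hnd).1 (he ▸ hc')
      simp [hne, hf c' (List.mem_cons_of_mem _ hc')]
    rw [ih _ _ hfresh (List.nodup_cons.mp hnd).2]
    rw [PySem.Dict.items_insert_of_not_contains d m hc, PySem.Dict.getD_counter]
    simp [pvG]

lemma pvSum_indicator (x : String) (p : String → Bool) (L : List String) (hnd : L.Nodup) :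
    ((L.filter p).map (fun d => if d = x then (1 : Int) else 0)).sum
      = if x ∈ L ∧ p x = true then 1 else 0 := by
  induction L with
  | nil => simp
  | cons a L ih =>
    have hnd' := List.nodup_cons.mp hnd
    by_cases hp : p a
    · rw [List.filter_cons_of_pos hp, List.map_cons, List.sum_cons, ih hnd'.2]
      by_cases hax : a = x
      · subst hax; simp [hnd'.1, hp]
      · have hxa : ¬ x = a := fun h => hax h.symm
        simp only [if_neg hax, zero_add, List.mem_cons]
        by_cases hpx : p x = true
        · simp [hpx, hxa]
        · simp [hpx]
    · rw [List.filter_cons_of_neg (by simpa using hp), ih hnd'.2]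
      have heq : (x ∈ a :: L ∧ p x = true) ↔ (x ∈ L ∧ p x = true) := by
        constructor
        · rintro ⟨hm, hpx⟩
          rcases List.mem_cons.mp hm with h | h
          · exact absurd (h ▸ hpx) hp
          · exact ⟨h, hpx⟩
        · exact fun h => ⟨List.mem_cons_of_mem _ h.1, h.2⟩
      simp only [heq]

lemma pvCountP_eq_sum (s L : List String) (p : String → Bool)
    (hnd : L.Nodup) (hcov : ∀ x ∈ s, x ∈ L) :
    (s.countP p : Int) = ((L.filter p).map (fun d => (s.count d : Int))).sum := by
  induction s with
  | nil => simp
  | cons x s ih =>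
    have hcov' : ∀ y ∈ s, y ∈ L := fun y hy => hcov y (List.mem_cons_of_mem _ hy)
    rw [List.countP_cons]
    have hsplit : ((L.filter p).map (fun d => ((x :: s).count d : Int))).sum
        = ((L.filter p).map (fun d => (s.count d : Int))).sum
          + ((L.filter p).map (fun d => if d = x then (1 : Int) else 0)).sum := by
      rw [← PySem.List.sum_map_add_int]
      apply congrArg
      apply List.map_congr_left
      intro d _
      rw [List.count_cons]
      by_cases hdx : d = x
      · subst hdx; simp
      · have : (x == d) = false := by simpa using fun h => hdx h.symm
        simp [this, hdx]
    rw [hsplit, pvSum_indicator x p L hnd, ← ih hcov']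
    have hx := hcov x (List.mem_cons_self ..)
    by_cases hp : p x = true
    · simp [hp, hx]
    · simp [hp]

lemma pvG_eq_map (s : List String) :
    ∀ (L P : List String) (m : Int),
      (P ++ L).Pairwise (· < ·) → (∀ x ∈ s, x ∈ P ++ L) →
      m = (P.map (fun d => (s.count d : Int))).sum →
      pvG s m L = L.map (fun c => (c, (s.countP (fun x => decide (x < c)) : Int))) := by
  intro L
  induction L with
  | nil => intro P m _ _ _; simp [pvG]
  | cons c L ih =>
    intro P m hpw hcov hm
    have hnd : (P ++ c :: L).Nodup := hpw.imp (fun h => ne_of_lt h)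
    have hfilter : (P ++ c :: L).filter (fun x => decide (x < c)) = P := by
      rw [List.filter_append]
      have h1 : P.filter (fun x => decide (x < c)) = P := by
        rw [List.filter_eq_self]
        intro a ha
        have := (List.pairwise_append.mp hpw).2.2 a ha c (List.mem_cons_self ..)
        simpa using this
      have h2 : (c :: L).filter (fun x => decide (x < c)) = [] := by
        rw [List.filter_eq_nil_iff]
        intro a ha
        rcases List.mem_cons.mp ha with h | h
        · subst h; simp
        · have := (List.pairwise_cons.mp (List.pairwise_append.mp hpw).2.1).1 a h
          simp [not_lt_of_gt this]
      rw [h1, h2, List.append_nil]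
    have hhead : m = (s.countP (fun x => decide (x < c)) : Int) := by
      rw [pvCountP_eq_sum s (P ++ c :: L) _ hnd hcov, hfilter, hm]
    have hpw' : ((P ++ [c]) ++ L).Pairwise (· < ·) := by simpa using hpw
    have hcov' : ∀ x ∈ s, x ∈ (P ++ [c]) ++ L := by simpa using hcov
    have hm' : m + (s.count c : Int) = ((P ++ [c]).map (fun d => (s.count d : Int))).sum := by
      rw [List.map_append, List.sum_append, ← hm]; simp
    rw [List.map_cons, pvG, ih (P ++ [c]) (m + (s.count c : Int)) hpw' hcov' hm', hhead]

lemma pvGetD_map_range (n k : Nat) (g : Nat → Int) (hk : k < n) :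
    ((List.range n).map g).getD k 0 = g k := by
  rw [List.getD_eq_getElem _ _ (by simpa using hk)]
  simp

lemma pvSet_map_range (n k : Nat) (g : Nat → Int) (a : Int) (_hk : k < n) :
    ((List.range n).map g).set k a = (List.range n).map (fun j => if j = k then a else g j) := by
  apply List.ext_getElem (by simp)
  intro i h1 h2
  rw [List.getElem_set]
  simp only [List.getElem_map, List.getElem_range]
  by_cases h : k = i
  · subst h; simp
  · rw [if_neg h, if_neg (fun hh : i = k => h hh.symm)]

def pvColA (s : List String) (i : Nat) (c : String) : List Int :=
  (List.range (s.length + 1)).map (fun j => if j ≤ i then ((s.take j).count c : Int) else 0)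

lemma pvColA_not_mem (s : List String) (i : Nat) (c : String) (h : c ∉ s.take i) :
    pvColA s i c = List.replicate (s.length + 1) 0 := by
  unfold pvColA
  have hrep : List.replicate (s.length + 1) (0 : Int)
      = (List.range (s.length + 1)).map (fun _ => (0 : Int)) := by
    symm
    rw [List.eq_replicate_iff]
    refine ⟨by simp, ?_⟩
    intro b hb
    rcases List.mem_map.mp hb with ⟨_, _, hx⟩
    exact hx.symm
  rw [hrep]
  apply List.map_congr_left
  intro j _
  by_cases hj : j ≤ i
  · rw [if_pos hj]
    have hsub : c ∉ s.take j := by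
      intro hc
      apply h
      have : s.take j = (s.take i).take j := by
        rw [List.take_take, Nat.min_eq_left hj]
      exact List.take_subset _ _ (this ▸ hc)
    simp [List.count_eq_zero.mpr hsub]
  · rw [if_neg hj]

lemma pvAdd_eq (S : PySem.Set String) (x : String) :
    S.add x = if x ∈ S then S else S ++ [x] := by
  unfold PySem.Set.add; split <;> simp_all

lemma pvDedup_snoc (t : List String) (x : String) :
    PySem.List.dedup (t ++ [x])
      = if x ∈ t then PySem.List.dedup t else PySem.List.dedup t ++ [x] := by
  rw [PySem.List.dedup_eq_ofList, PySem.List.dedup_eq_ofList]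
  have h1 : PySem.Set.ofList (t ++ [x]) = (PySem.Set.ofList t).add x := by
    unfold PySem.Set.ofList
    rw [List.foldl_append, List.foldl_cons, List.foldl_nil]
  rw [h1, pvAdd_eq]
  by_cases h : x ∈ t
  · rw [if_pos ((PySem.Set.mem_ofList t x).mpr h), if_pos h]
  · rw [if_neg (fun hc => h ((PySem.Set.mem_ofList t x).mp hc)), if_neg h]

lemma pvInner (n : Nat) (f : List Int → List Int) :
    ∀ (K : List String) (D : PySem.Dict String (List Int)),
      K.Nodup → (∀ c ∈ K, D.contains c = true) →
      ((K.foldl (fun d' c =>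
          d'.insert c (f (d'.getD c (List.replicate (n + 1) (0 : Int))))) D).keys = D.keys
      ∧ ∀ c, (K.foldl (fun d' c =>
          d'.insert c (f (d'.getD c (List.replicate (n + 1) (0 : Int))))) D).getD c
            (List.replicate (n + 1) (0 : Int))
          = if c ∈ K then f (D.getD c (List.replicate (n + 1) (0 : Int)))
            else D.getD c (List.replicate (n + 1) (0 : Int))) := by
  intro K
  induction K with
  | nil => intro D _ _; simp
  | cons c K ih =>
    intro D hnd hsub
    have hc : D.contains c = true := hsub c (List.mem_cons_self ..)
    have hnd' := List.nodup_cons.mp hnd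
    set D' := D.insert c (f (D.getD c (List.replicate (n + 1) (0 : Int)))) with hD'
    have hsub' : ∀ c' ∈ K, D'.contains c' = true := by
      intro c' hc'
      rw [hD', PySem.Dict.contains_insert]
      rw [hsub c' (List.mem_cons_of_mem _ hc')]
      simp
    obtain ⟨hk, hg⟩ := ih D' hnd'.2 hsub'
    rw [List.foldl_cons]
    constructor
    · rw [← hD', hk, hD', PySem.Dict.keys_insert_of_contains D _ hc]
    · intro c''
      rw [← hD', hg c'']
      by_cases hmem : c'' ∈ K
      · rw [if_pos hmem, if_pos (List.mem_cons_of_mem _ hmem)]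
        have hne : c'' ≠ c := fun he => hnd'.1 (he ▸ hmem)
        rw [hD', PySem.Dict.getD_insert, if_neg hne]
      · rw [if_neg hmem, hD', PySem.Dict.getD_insert]
        by_cases he : c'' = c
        · rw [if_pos he, if_pos (by rw [he]; exact List.mem_cons_self ..), he]
        · rw [if_neg he, if_neg (by simp [List.mem_cons, he, hmem])]

def pvF (i : Int) (v : List Int) : List Int :=
  PySem.List.pySetD v (i + 1) (PySem.List.pyGetD v i 0)

def pvStepA (s : List String) (d : PySem.Dict String (List Int)) (i : Int) :
    PySem.Dict String (List Int) :=
  (d.keys.foldl (fun d' c =>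
      d'.insert c (pvF i (d'.getD c (List.replicate (s.length + 1) (0 : Int))))) d).insert
    (PySem.List.pyGetD s i "")
    (PySem.List.pySetD
      ((d.keys.foldl (fun d' c =>
          d'.insert c (pvF i (d'.getD c (List.replicate (s.length + 1) (0 : Int))))) d).getD
        (PySem.List.pyGetD s i "") (List.replicate (s.length + 1) (0 : Int)))
      (i + 1)
      (PySem.List.pyGetD
        ((d.keys.foldl (fun d' c =>
            d'.insert c (pvF i (d'.getD c (List.replicate (s.length + 1) (0 : Int))))) d).getD
          (PySem.List.pyGetD s i "") (List.replicate (s.length + 1) (0 : Int)))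
        (i + 1) 0 + 1))

lemma pvCast (i : Nat) : ((i : Int) + 1) = (((i + 1 : Nat)) : Int) := by push_cast; ring

lemma pvF_colA (s : List String) (i : Nat) (c : String) (hi : i < s.length) :
    pvF (i : Int) (pvColA s i c)
      = (List.range (s.length + 1)).map
          (fun j => if j ≤ i then ((s.take j).count c : Int)
            else if j = i + 1 then ((s.take i).count c : Int) else 0) := by
  unfold pvF pvColA
  rw [PySem.List.pyGetD_natCast, pvGetD_map_range _ _ _ (by omega), pvCast,
      PySem.List.pySetD_natCast, pvSet_map_range _ _ _ _ (by omega),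
      if_pos (le_refl i)]
  apply List.map_congr_left
  intro j hj
  by_cases h1 : j = i + 1
  · subst h1
    simp [show ¬ (i + 1 ≤ i) from by omega]
  · by_cases h2 : j ≤ i
    · simp [h1, h2]
    · simp [h1, h2]

lemma pvF_repl (n i : Nat) (hi : i < n) :
    pvF (i : Int) (List.replicate (n + 1) (0 : Int)) = List.replicate (n + 1) 0 := by
  unfold pvF
  rw [PySem.List.pyGetD_natCast,
      List.getD_eq_getElem _ _ (by rw [List.length_replicate]; omega),
      List.getElem_replicate, pvCast, PySem.List.pySetD_natCast]
  apply List.ext_getElem (by simp)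
  intro k h1 h2
  rw [List.getElem_set]
  split <;> simp

lemma pvTake_snoc (s : List String) (i : Nat) (hi : i < s.length) :
    s.take (i + 1) = s.take i ++ [s[i]] := by
  rw [List.take_add_one, List.getElem?_eq_getElem hi]
  rfl

lemma pvColA_bump (s : List String) (i : Nat) (hi : i < s.length) :
    PySem.List.pySetD (pvF (i : Int) (pvColA s i (s[i]))) ((i : Int) + 1)
      (PySem.List.pyGetD (pvF (i : Int) (pvColA s i (s[i]))) ((i : Int) + 1) 0 + 1)
      = pvColA s (i + 1) (s[i]) := by
  rw [pvF_colA s i _ hi, pvCast, PySem.List.pyGetD_natCast,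
      pvGetD_map_range _ _ _ (by omega), PySem.List.pySetD_natCast,
      pvSet_map_range _ _ _ _ (by omega)]
  have hv : (if i + 1 ≤ i then ((s.take (i + 1)).count (s[i]) : Int)
      else if i + 1 = i + 1 then ((s.take i).count (s[i]) : Int) else 0)
      = ((s.take i).count (s[i]) : Int) := by
    rw [if_neg (by omega), if_pos rfl]
  rw [hv]
  unfold pvColA
  apply List.map_congr_left
  intro j hj
  by_cases h1 : j = i + 1
  · subst h1
    rw [if_pos rfl, if_pos (by omega : i + 1 ≤ i + 1),
        pvTake_snoc s i hi, pvCount_append_x]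
    simp
  · rw [if_neg h1]
    by_cases h2 : j ≤ i
    · rw [if_pos h2, if_pos (by omega : j ≤ i + 1)]
    · rw [if_neg h2, if_neg h1, if_neg (by omega : ¬ j ≤ i + 1)]

lemma pvColA_step_ne (s : List String) (i : Nat) (c : String) (hi : i < s.length)
    (hne : c ≠ s[i]) : pvF (i : Int) (pvColA s i c) = pvColA s (i + 1) c := by
  rw [pvF_colA s i c hi]
  unfold pvColA
  apply List.map_congr_left
  intro j hj
  by_cases h1 : j = i + 1
  · subst h1
    rw [if_neg (by omega : ¬ i + 1 ≤ i), if_pos rfl, if_pos (by omega : i + 1 ≤ i + 1),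
        pvTake_snoc s i hi, pvCount_append_x]
    have hne' : (s[i] == c) = false := by
      simpa using fun h => hne h.symm
    rw [hne']
    simp
  · by_cases h2 : j ≤ i
    · rw [if_pos h2, if_pos (by omega : j ≤ i + 1)]
    · rw [if_neg h2, if_neg h1, if_neg (by omega : ¬ j ≤ i + 1)]

lemma pvStepA_inv (s : List String) (i : Nat) (hi : i < s.length)
    (D : PySem.Dict String (List Int))
    (hkeys : D.keys = PySem.List.dedup (s.take i))
    (hget : ∀ c, D.getD c (List.replicate (s.length + 1) (0 : Int)) = pvColA s i c) :
    (pvStepA s D (i : Int)).keys = PySem.List.dedup (s.take (i + 1))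
    ∧ ∀ c, (pvStepA s D (i : Int)).getD c (List.replicate (s.length + 1) (0 : Int))
        = pvColA s (i + 1) c := by
  have hndK : D.keys.Nodup := by rw [hkeys]; exact PySem.List.nodup_dedup _
  have hsub : ∀ c ∈ D.keys, D.contains c = true := by
    intro c hc
    rw [PySem.Dict.contains_eq_decide_mem_keys]
    simpa using hc
  obtain ⟨hk1, hg1⟩ := pvInner s.length (pvF (i : Int)) D.keys D hndK hsub
  have hch : PySem.List.pyGetD s (i : Int) "" = s[i] := by
    rw [PySem.List.pyGetD_natCast, List.getD_eq_getElem _ _ hi]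
  have hd1 : ∀ c,
      (D.keys.foldl (fun d' c =>
        d'.insert c (pvF (i : Int) (d'.getD c (List.replicate (s.length + 1) (0 : Int))))) D).getD
        c (List.replicate (s.length + 1) (0 : Int)) = pvF (i : Int) (pvColA s i c) := by
    intro c
    rw [hg1 c]
    by_cases hm : c ∈ D.keys
    · rw [if_pos hm, hget c]
    · rw [if_neg hm, hget c]
      have hnm : c ∉ s.take i := by
        rw [hkeys, PySem.List.mem_dedup] at hm
        exact hm
      rw [pvColA_not_mem s i c hnm, pvF_repl s.length i hi]
  unfold pvStepA
  rw [hch, hd1 s[i]]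
  constructor
  · by_cases hxm : s[i] ∈ s.take i
    · have hcont : (D.keys.foldl (fun d' c =>
          d'.insert c (pvF (i : Int) (d'.getD c (List.replicate (s.length + 1) (0 : Int))))) D).contains s[i] = true := by
        rw [PySem.Dict.contains_eq_decide_mem_keys, hk1, hkeys]
        simp [hxm]
      rw [PySem.Dict.keys_insert_of_contains _ _ hcont, hk1, hkeys,
          pvTake_snoc s i hi, pvDedup_snoc, if_pos hxm]
    · have hcont : (D.keys.foldl (fun d' c =>
          d'.insert c (pvF (i : Int) (d'.getD c (List.replicate (s.length + 1) (0 : Int))))) D).contains s[i] = false := by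
        rw [PySem.Dict.contains_eq_decide_mem_keys, hk1, hkeys]
        simp [hxm]
      rw [PySem.Dict.keys_insert_of_not_contains _ _ hcont, hk1, hkeys,
          pvTake_snoc s i hi, pvDedup_snoc, if_neg hxm]
  · intro c
    rw [PySem.Dict.getD_insert]
    by_cases he : c = s[i]
    · rw [if_pos he, he, pvColA_bump s i hi]
    · rw [if_neg he, hd1 c, pvColA_step_ne s i c hi he]

lemma pvA_occ_inv (s : List String) :
    ∀ i, i ≤ s.length →
      ((PySem.List.pyRange 0 (i : Int)).foldl (pvStepA s) PySem.Dict.empty).keys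
        = PySem.List.dedup (s.take i)
      ∧ ∀ c, ((PySem.List.pyRange 0 (i : Int)).foldl (pvStepA s) PySem.Dict.empty).getD
          c (List.replicate (s.length + 1) (0 : Int)) = pvColA s i c := by
  intro i
  induction i with
  | zero =>
    intro _
    rw [PySem.List.pyRange_zero_natCast, List.range_zero, List.map_nil, List.foldl_nil]
    constructor
    · rw [List.take_zero]
      rfl
    · intro c
      rw [PySem.Dict.getD_empty, pvColA_not_mem s 0 c (by simp)]
  | succ i ih =>
    intro h
    have hi : i < s.length := by omega
    obtain ⟨hk, hg⟩ := ih (by omega)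
    rw [PySem.List.pyRange_zero_natCast] at hk hg
    rw [PySem.List.pyRange_zero_natCast, List.range_succ, List.map_append,
        List.foldl_append, List.map_singleton, List.foldl_cons, List.foldl_nil]
    exact pvStepA_inv s i hi _ hk hg


lemma pvTC (s : List String) :
    ((PySem.List.sorted (PySem.Dict.counter s).keys (fun x => x) false).foldl
        (fun p ch => (p.1.insert ch p.2, p.2 + (PySem.Dict.counter s).getD ch 0))
        ((PySem.Dict.empty : PySem.Dict String Int), (0 : Int))).1.items
      = (PySem.List.sorted (PySem.Set.ofList s) (fun x => x) false).map
          (fun c => (c, (s.countP (fun x => decide (x < c)) : Int))) := by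
  rw [PySem.Dict.keys_counter]
  have hperm : (PySem.List.sorted (PySem.Set.ofList s) (fun x => x) false).Perm
      (PySem.Set.ofList s) := PySem.List.sorted_perm _ _ _
  have hnd : (PySem.List.sorted (PySem.Set.ofList s) (fun x => x) false).Nodup :=
    hperm.nodup_iff.mpr (PySem.Set.nodup_ofList s)
  have hfresh : ∀ c ∈ PySem.List.sorted (PySem.Set.ofList s) (fun x => x) false,
      (PySem.Dict.empty : PySem.Dict String Int).contains c = false := by
    intro c _
    exact PySem.Dict.contains_empty ..
  rw [pvA_tc_fold s _ PySem.Dict.empty 0 hfresh hnd]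
  have hie : (PySem.Dict.empty : PySem.Dict String Int).items = [] := rfl
  rw [hie, List.nil_append]
  apply pvG_eq_map s _ [] 0
  · simpa using PySem.List.sorted_ofList_pairwise_lt s
  · intro x hx
    simp [PySem.List.mem_sorted, PySem.Set.mem_ofList, hx]
  · simp

lemma pvOCC (s : List String) :
    ((PySem.List.pyRange 0 (s.length : Int)).foldl (pvStepA s) PySem.Dict.empty).items
      = (PySem.List.dedup s).map
          (fun c => (c, (s.foldl (fun (acc : List Int × Int) ch =>
                let r := if ch == c then acc.2 + 1 else acc.2
                (acc.1 ++ [r], r)) ([0], 0)).1)) := by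
  obtain ⟨hk, hg⟩ := pvA_occ_inv s s.length (le_refl _)
  rw [PySem.Dict.items_eq_map_keys _ (by rw [hk]; exact PySem.List.nodup_dedup _)
      (List.replicate (s.length + 1) (0 : Int)), hk, List.take_length]
  apply List.map_congr_left
  intro c _
  have hb : (s.foldl (fun (acc : List Int × Int) ch =>
        let r := if ch == c then acc.2 + 1 else acc.2
        (acc.1 ++ [r], r)) ([0], 0)).1
      = (List.range (s.length + 1)).map (fun j => ((s.take j).count c : Int)) := by
    rw [pvB_col]
  rw [hg c, hb]
  unfold pvColA
  rw [Prod.mk.injEq]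
  refine ⟨rfl, ?_⟩
  apply List.map_congr_left
  intro j hj
  rw [if_pos (Nat.lt_succ_iff.mp (List.mem_range.mp hj))]

-- ===== VERDICT (by name: the statement is the Claim_ definition above) =====
theorem build_fm_index_spec : Claim_equal_build_fm_index := by
  unfold Claim_equal_build_fm_index
  intro bwt _
  unfold Spec_build_fm_index
  refine Prod.ext ?_ ?_
  · exact pvTC (bwt.toList.map (fun c => String.ofList [c]))
  · exact pvOCC (bwt.toList.map (fun c => String.ofList [c]))
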